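-- pv_equiv track=rewrite | github.com/kawkmin/Python-PS | LV0 컨트롤 제트.py | solution
-- ===== SOURCE A (Python) =====
-- def solution(s):
--     answer = 0
--     data = s.split(" ")
--     i=len(data)-1
--     while i>=0:
--         if data[i]=="Z":
--             answer-= int(data[i-1])*2
--         else :
--             answer+=int(data[i])
--         i-=1
--
--     return answer
-- ===== SOURCE B (Python) =====
-- def solution(s):
--     # Stack algorithm: each number is pushed; "Z" negates the top of the stack
--     # (pop v, push -v), which cancels the +v already counted and charges -v,
--     # i.e. the same net -2*v that A computes.  A leading "Z" with an empty
--     # stack cancels nothing (A instead wraps around to the last token; that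
--     # corner is declared as an intended difference).
--     stack = []
--     for t in s.split(" "):
--         if t == "Z":
--             if stack:
--                 stack.append(-stack.pop())
--         else:
--             stack.append(int(t))
--     return sum(stack)
-- ===== Notes on version B (the rewrite author's own statement) =====
-- stated objective: alternative
-- what changed: Replaces A's backward index-decrementing while loop with a forward stack algorithm: numbers are pushed, each 'Z' negates the top of the stack (pop v, push -v), and the result is the stack's sum.
-- intended difference: On inputs whose first space-separated token is 'Z' (and whose last token is a nonzero integer), A wraps around via data[-1] and subtracts twice the LAST token's value (e.g. -3 on 'Z 3'), while B lets a 'Z' with nothing before it cancel nothing (3 on 'Z 3'), which is the intended reading since there is no previous number to cancel. — e.g. on solution("Z 3"): A returns -3, B returns 3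
import Mathlib
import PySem

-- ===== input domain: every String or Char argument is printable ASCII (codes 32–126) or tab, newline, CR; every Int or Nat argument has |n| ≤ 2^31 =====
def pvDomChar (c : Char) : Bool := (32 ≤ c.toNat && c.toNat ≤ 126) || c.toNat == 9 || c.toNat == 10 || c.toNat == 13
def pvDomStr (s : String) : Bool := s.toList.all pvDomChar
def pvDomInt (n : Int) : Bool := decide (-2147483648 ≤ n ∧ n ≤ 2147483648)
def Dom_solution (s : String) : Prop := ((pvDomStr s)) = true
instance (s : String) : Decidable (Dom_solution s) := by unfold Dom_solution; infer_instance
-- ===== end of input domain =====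

-- B replaces A's backward while loop by a forward stack algorithm ('Z' negates the stack top);
-- return value only, no side effects.

-- int(t), with 0 outside Pre_ (where the Python raises ValueError)
def pvParse (t : String) : Int := (PySem.Int.ofStr? t).getD 0
-- int(data[i-1]) with Python's negative-index wraparound (data[-1] when i = 0)
def pvPrev (data : List String) (i : Int) : Int :=
  pvParse ((PySem.List.pyGet? data (i - 1)).getD "")

-- ===== PORT A =====
-- the backward 'while i>=0' loop: solLoopA data (n+1) handles index i = n, then recurses on i-1
def solLoopA (data : List String) : Nat → Int
  | 0 => 0
  | n + 1 =>
    let t := (PySem.List.pyGet? data (n : Int)).getD ""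
    if t == "Z" then solLoopA data n - pvPrev data (n : Int) * 2
    else solLoopA data n + pvParse t

def solution (s : String) : Int :=
  let data := (PySem.Str.split? s " ").getD []
  solLoopA data data.length

-- ===== PORT B =====
-- forward pass over the tokens; head of the list is the top of the Python stack
def solLoopB (stack : List Int) : List String → List Int
  | [] => stack
  | t :: rest =>
    if t == "Z" then
      match stack with
      | [] => solLoopB [] rest
      | v :: tail => solLoopB ((-v) :: tail) rest
    else solLoopB (pvParse t :: stack) rest

def solution_alt (s : String) : Int :=
  let data := (PySem.Str.split? s " ").getD []
  (solLoopB [] data).sum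

-- ===== PRECONDITION & SPEC =====
-- Pre_ excludes exactly the inputs on which the Python A raises ValueError: some token that A
-- passes to int() (a non-'Z' token, or the predecessor of a 'Z' token) does not parse.
def Pre_solution (s : String) : Prop :=
  ∀ p ∈ PySem.List.enumerate ((PySem.Str.split? s " ").getD []) 0,
    (if p.2 == "Z" then
      (PySem.Int.ofStr? ((PySem.List.pyGet? ((PySem.Str.split? s " ").getD []) (p.1 - 1)).getD "")).isSome
     else (PySem.Int.ofStr? p.2).isSome) = true
instance (s : String) : Decidable (Pre_solution s) := by unfold Pre_solution; infer_instance
def pvWitness_solution : String := "1 2 Z 3"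

-- the characters of s after the last space (= the last token of s.split(" "))
def pvNotSpace (c : Char) : Bool := c ≠ ' '
def pvLastTok (s : String) : String :=
  String.ofList ((s.toList.reverse.takeWhile pvNotSpace).reverse)

-- On inputs whose first space-separated token is "Z" (and whose last token is a nonzero integer),
-- A wraps around via data[-1] and subtracts twice the LAST token's value, while B lets a 'Z' with
-- nothing before it cancel nothing, which is the intended reading since there is no previous
-- number to cancel.
def D_solution (s : String) : Prop :=
  s.toList.takeWhile (fun c => c ≠ ' ') = ['Z'] ∧
  PySem.Int.ofStr? (pvLastTok s) ≠ some 0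
instance (s : String) : Decidable (D_solution s) := by unfold D_solution; infer_instance

def Spec_solution (s : String) (out : Int) : Prop := ¬ D_solution s → out = solution_alt s
instance (s : String) (out : Int) : Decidable (Spec_solution s out) := by unfold Spec_solution; infer_instance

def pvDiffWitness_solution : String := "Z 3"
def pvDiffWitnessOut_solution : Int × Int := (-3, 3)

-- ===== CLAIM (what is proved, stated in full; the proofs are below) =====
def Claim_unchanged_solution : Prop :=
  ∀ (s : String), Dom_solution s → Pre_solution s → Spec_solution s (solution s)
def Claim_changed_solution : Prop :=
  Dom_solution (pvDiffWitness_solution) ∧ Pre_solution (pvDiffWitness_solution) ∧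
  D_solution (pvDiffWitness_solution) ∧
  solution (pvDiffWitness_solution) = pvDiffWitnessOut_solution.1 ∧
  solution_alt (pvDiffWitness_solution) = pvDiffWitnessOut_solution.2 ∧
  pvDiffWitnessOut_solution.1 ≠ pvDiffWitnessOut_solution.2
def Claim_exact_solution : Prop :=
  ∀ (s : String), Dom_solution s → Pre_solution s → D_solution s →
    solution s ≠ solution_alt s

-- ===== LEMMAS AND PROOFS =====

-- bridge: the first token of s.split(" ") is the prefix of s before the first space
theorem go_acc (sep : List Char) : ∀ (fuel : Nat) (l cur : List Char) (acc : List (List Char)),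
    PySem.Chars.splitOn.go sep fuel l cur acc
      = acc.reverse ++ PySem.Chars.splitOn.go sep fuel l cur [] := by
  intro fuel
  induction fuel with
  | zero => intro l cur acc; simp [PySem.Chars.splitOn.go]
  | succ m ih =>
    intro l cur acc
    cases l with
    | nil => simp [PySem.Chars.splitOn.go]
    | cons c rest =>
      simp only [PySem.Chars.splitOn.go]
      by_cases hp : sep.isPrefixOf (c :: rest) = true
      · simp only [hp, if_true]
        rw [ih, ih (List.drop sep.length (c :: rest)) [] [cur.reverse]]
        simp
      · simp only [hp]
        exact ih rest (c :: cur) acc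

theorem go_head : ∀ (fuel : Nat) (l cur : List Char), l.length ≤ fuel →
    (PySem.Chars.splitOn.go [' '] fuel l cur []).head?
      = some (cur.reverse ++ l.takeWhile (fun c => c ≠ ' ')) := by
  intro fuel
  induction fuel with
  | zero =>
    intro l cur hl
    have : l = [] := List.eq_nil_of_length_eq_zero (Nat.le_zero.mp hl)
    subst this
    simp [PySem.Chars.splitOn.go]
  | succ m ih =>
    intro l cur hl
    cases l with
    | nil => simp [PySem.Chars.splitOn.go]
    | cons c rest =>
      simp only [PySem.Chars.splitOn.go]
      by_cases hc : c = ' '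
      · have hp : List.isPrefixOf [' '] (c :: rest) = true := by simp [List.isPrefixOf, hc]
        simp only [hp, if_true]
        rw [go_acc]
        simp [List.takeWhile, hc]
      · have h1 : (' ' == c) = false := beq_eq_false_iff_ne.mpr (fun h => hc h.symm)
        have hp : List.isPrefixOf [' '] (c :: rest) = false := by
          simp [List.isPrefixOf, h1]
        simp only [hp, Bool.false_eq_true, if_false]
        rw [ih rest (c :: cur) (by simpa using Nat.succ_le_succ_iff.mp hl)]
        simp [List.takeWhile, hc]

theorem split_head (s : String) :
    (((PySem.Str.split? s " ").getD []).head?)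
      = some (String.ofList (s.toList.takeWhile (fun c => c ≠ ' '))) := by
  have h := go_head (s.toList.length + 1) s.toList [] (Nat.le_succ _)
  simp only [PySem.Str.split?]
  rw [show (" " : String).toList = [' '] from rfl]
  simp only [PySem.Chars.split?]
  rw [if_neg (by decide)]
  simp only [Option.map_some, Option.getD_some, PySem.Chars.splitOn]
  rw [List.head?_map, h]
  simp

-- bridge: the last token of s.split(" ") is the suffix of s after the last space
theorem takeWhile_append_stop (q : Char → Bool) (x : Char) (hx : q x = false) :
    ∀ (l1 l2 : List Char), (l1 ++ x :: l2).takeWhile q = l1.takeWhile q := by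
  intro l1 l2
  induction l1 with
  | nil => simp [List.takeWhile, hx]
  | cons a t ih =>
    simp only [List.cons_append, List.takeWhile]
    cases q a <;> simp [ih]

theorem takeWhile_pvNotSpace_self (cur : List Char) (hcur : ∀ c ∈ cur, c ≠ ' ') :
    cur.takeWhile pvNotSpace = cur := by
  rw [List.takeWhile_eq_self_iff]
  intro a ha
  simp [pvNotSpace, hcur a ha]

theorem go_last : ∀ (fuel : Nat) (l cur : List Char) (acc : List (List Char)),
    l.length ≤ fuel → (∀ c ∈ cur, c ≠ ' ') →
    (PySem.Chars.splitOn.go [' '] fuel l cur acc).getLast?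
      = some (((cur.reverse ++ l).reverse.takeWhile pvNotSpace).reverse) := by
  intro fuel
  induction fuel with
  | zero =>
    intro l cur acc hl hcur
    have hln : l = [] := List.eq_nil_of_length_eq_zero (Nat.le_zero.mp hl)
    subst hln
    rw [show PySem.Chars.splitOn.go [' '] 0 [] cur acc = ((cur.reverse ++ []) :: acc).reverse from rfl]
    rw [List.getLast?_reverse]
    simp only [List.append_nil, List.reverse_reverse, List.head?_cons]
    rw [takeWhile_pvNotSpace_self cur hcur]
  | succ m ih =>
    intro l cur acc hl hcur
    cases l with
    | nil =>
      rw [show PySem.Chars.splitOn.go [' '] (m + 1) [] cur acc = (cur.reverse :: acc).reverse from rfl]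
      rw [List.getLast?_reverse]
      simp only [List.append_nil, List.reverse_reverse, List.head?_cons]
      rw [takeWhile_pvNotSpace_self cur hcur]
    | cons c rest =>
      simp only [PySem.Chars.splitOn.go]
      by_cases hc : c = ' '
      · have hp : List.isPrefixOf [' '] (c :: rest) = true := by simp [List.isPrefixOf, hc]
        simp only [hp, if_true]
        rw [ih (List.drop [' '].length (c :: rest)) [] (cur.reverse :: acc)
          (by simpa using Nat.succ_le_succ_iff.mp hl) (by simp)]
        subst hc
        simp only [List.length_cons, List.length_nil, List.drop_succ_cons, List.drop_zero,
          List.nil_append, List.reverse_nil]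
        rw [List.reverse_append, List.reverse_cons, List.reverse_reverse, List.append_assoc,
          List.singleton_append]
        rw [takeWhile_append_stop pvNotSpace ' ' (by decide)]
      · have h1 : (' ' == c) = false := beq_eq_false_iff_ne.mpr (fun h => hc h.symm)
        have hp : List.isPrefixOf [' '] (c :: rest) = false := by simp [List.isPrefixOf, h1]
        simp only [hp, Bool.false_eq_true, if_false]
        have hcur' : ∀ a ∈ c :: cur, a ≠ ' ' := by
          intro a ha
          rcases List.mem_cons.mp ha with h | h
          · exact h ▸ hc
          · exact hcur a h
        rw [ih rest (c :: cur) acc (by simpa using Nat.succ_le_succ_iff.mp hl) hcur']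
        rw [show (c :: cur).reverse ++ rest = cur.reverse ++ c :: rest by simp]

theorem split_last (s : String) :
    ((PySem.Str.split? s " ").getD []).getLast? = some (pvLastTok s) := by
  have h := go_last (s.toList.length + 1) s.toList [] [] (Nat.le_succ _) (by simp)
  simp only [PySem.Str.split?]
  rw [show (" " : String).toList = [' '] from rfl]
  simp only [PySem.Chars.split?]
  rw [if_neg (by decide)]
  simp only [Option.map_some, Option.getD_some, PySem.Chars.splitOn]
  rw [List.getLast?_map, h]
  simp [pvLastTok]

-- the common value: contribution sum over the tokens, carrying the previous token p
def contribSum (p : String) : List String → Int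
  | [] => 0
  | t :: r => (if t == "Z" then -(pvParse p * 2) else pvParse t) + contribSum t r

theorem contribSum_concat (l : List String) (t : String) : ∀ p,
    contribSum p (l ++ [t]) =
      contribSum p l + (if t == "Z" then -(pvParse (l.getLastD p) * 2) else pvParse t) := by
  induction l with
  | nil => intro p; simp [contribSum]
  | cons x xs ih =>
    intro p
    simp only [List.cons_append, contribSum, ih x, List.getLastD_cons]
    ring

-- A's loop over the first n indices equals the contribution sum over the first n tokens,
-- with the wrapped-around data[-1] as the initial "previous token"
theorem loopA_eq_contribSum (data : List String) :
    ∀ n, n ≤ data.length →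
      solLoopA data n
        = contribSum ((PySem.List.pyGet? data (-1)).getD "") (data.take n) := by
  intro n
  induction n with
  | zero => intro _; simp [solLoopA, contribSum]
  | succ m ih =>
    intro hn
    have hm : m < data.length := Nat.lt_of_succ_le hn
    have htake : data.take (m + 1) = data.take m ++ [data[m]] := by
      rw [List.take_add_one, List.getElem?_eq_getElem hm]; rfl
    have hpy : (PySem.List.pyGet? data ((m : Nat) : Int)).getD "" = data[m] := by
      simp [PySem.List.pyGet?_natCast, List.getElem?_eq_getElem hm]
    rw [htake, contribSum_concat, ← ih (Nat.le_of_lt hm)]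
    simp only [solLoopA, hpy]
    by_cases hz : data[m] == "Z"
    · have hprev : pvPrev data (m : Int)
          = pvParse ((data.take m).getLastD ((PySem.List.pyGet? data (-1)).getD "")) := by
        cases m with
        | zero =>
          simp only [List.take_zero, List.getLastD_nil]
          unfold pvPrev
          norm_num
        | succ k =>
          have hk : k < data.length := Nat.lt_of_succ_lt hm
          have h1 : ((k + 1 : Nat) : Int) - 1 = ((k : Nat) : Int) := by push_cast; ring
          have h2 : (data.take (k + 1)).getLastD ((PySem.List.pyGet? data (-1)).getD "")
              = data[k] := by
            have he : data.take (k + 1) = data.take k ++ [data[k]] := by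
              rw [List.take_add_one, List.getElem?_eq_getElem hk]; rfl
            rw [he, List.getLastD_concat]
          rw [pvPrev, h1, h2]
          simp [PySem.List.pyGet?_natCast, List.getElem?_eq_getElem hk]
      rw [hprev]
      simp only [hz, if_true]
      ring
    · simp only [if_neg hz]

-- chain condition: every "Z" token's carried predecessor parses as an int
def pvChain : String → List String → Prop
  | _, [] => True
  | p, t :: r => (t = "Z" → (PySem.Int.ofStr? p).isSome = true) ∧ pvChain t r

-- B's stack invariant: if the previous token parses, it is on top of the stack
theorem loopB_eq_contribSum : ∀ (rest : List String) (p : String) (st : List Int),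
    pvChain p rest →
    ((PySem.Int.ofStr? p).isSome = true → st.head? = some (pvParse p)) →
    (solLoopB st rest).sum = st.sum + contribSum p rest := by
  intro rest
  induction rest with
  | nil => intro p st _ _; simp [solLoopB, contribSum]
  | cons t r ih =>
    intro p st hC hst
    by_cases hz : t = "Z"
    · have hp : (PySem.Int.ofStr? p).isSome = true := hC.1 hz
      have hhead := hst hp
      cases st with
      | nil => simp at hhead
      | cons v tail =>
        have hv : v = pvParse p := by simpa using hhead
        have hZ : (PySem.Int.ofStr? "Z").isSome = false := by decide
        have : (solLoopB ((-v) :: tail) r).sum = ((-v) :: tail).sum + contribSum "Z" r := by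
          apply ih "Z" ((-v) :: tail) (hz ▸ hC.2)
          intro h; rw [hZ] at h; exact absurd h (by decide)
        simp only [solLoopB, hz, BEq.rfl, if_true]
        rw [this, hv]
        simp [contribSum]
        ring
    · have hb : (t == "Z") = false := by simpa using hz
      have : (solLoopB (pvParse t :: st) r).sum = (pvParse t :: st).sum + contribSum t r := by
        apply ih t (pvParse t :: st) hC.2
        intro _; simp
      simp only [solLoopB, hb, Bool.false_eq_true, if_false]
      rw [this]
      simp [contribSum, hb]
      ring

-- the chain condition follows from Pre_ (predecessors parse)
theorem pvChain_of (data : List String)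
    (P1 : ∀ (j : Nat) (hj : j + 1 < data.length),
      data[j + 1] = "Z" → (PySem.Int.ofStr? (data[j]'(Nat.lt_of_succ_lt hj))).isSome = true) :
    ∀ (k i : Nat) (p : String), data.length - i = k →
    (∀ hi : i < data.length, data[i] = "Z" → (PySem.Int.ofStr? p).isSome = true) →
    pvChain p (data.drop i) := by
  intro k
  induction k with
  | zero =>
    intro i p hk _
    have : data.length ≤ i := by omega
    simp [List.drop_eq_nil_of_le this, pvChain]
  | succ m ih =>
    intro i p hk Hp
    have hi : i < data.length := by omega
    rw [List.drop_eq_getElem_cons hi]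
    refine ⟨Hp hi, ?_⟩
    exact ih (i + 1) data[i] (by omega) (fun hi1 => P1 i hi1)

theorem P1_of_pre (s : String) (hPre : Pre_solution s) :
    ∀ (j : Nat) (hj : j + 1 < ((PySem.Str.split? s " ").getD []).length),
      ((PySem.Str.split? s " ").getD [])[j + 1] = "Z" →
      (PySem.Int.ofStr? (((PySem.Str.split? s " ").getD [])[j]'(Nat.lt_of_succ_lt hj))).isSome = true := by
  intro j hj hz
  have hjlt : j < ((PySem.Str.split? s " ").getD []).length := Nat.lt_of_succ_lt hj
  have hmem : ((0 : Int) + ((j + 1 : Nat) : Int), ((PySem.Str.split? s " ").getD [])[j + 1])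
      ∈ PySem.List.enumerate ((PySem.Str.split? s " ").getD []) 0 := by
    rw [PySem.List.mem_enumerate_iff]
    exact ⟨j + 1, hj, rfl⟩
  have h : (if ((PySem.Str.split? s " ").getD [])[j + 1] == "Z" then
      (PySem.Int.ofStr? ((PySem.List.pyGet? ((PySem.Str.split? s " ").getD [])
        ((0 : Int) + ((j + 1 : Nat) : Int) - 1)).getD "")).isSome
    else (PySem.Int.ofStr? (((PySem.Str.split? s " ").getD [])[j + 1])).isSome) = true :=
    hPre _ hmem
  rw [if_pos (show ((((PySem.Str.split? s " ").getD [])[j + 1]) == "Z") = true by simp [hz])] at h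
  have hidx : (0 : Int) + ((j + 1 : Nat) : Int) - 1 = ((j : Nat) : Int) := by push_cast; ring
  rw [hidx, PySem.List.pyGet?_natCast, List.getElem?_eq_getElem hjlt] at h
  simpa using h

-- Pre_ at index 0 when the first token is "Z": the wrapped-around data[-1] parses
theorem P0_of_pre (s : String) (hPre : Pre_solution s)
    (h0 : 0 < ((PySem.Str.split? s " ").getD []).length)
    (hz : ((PySem.Str.split? s " ").getD [])[0] = "Z") :
    (PySem.Int.ofStr? ((PySem.List.pyGet? ((PySem.Str.split? s " ").getD []) (-1)).getD "")).isSome = true := by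
  have hmem : ((0 : Int) + ((0 : Nat) : Int), ((PySem.Str.split? s " ").getD [])[0])
      ∈ PySem.List.enumerate ((PySem.Str.split? s " ").getD []) 0 := by
    rw [PySem.List.mem_enumerate_iff]
    exact ⟨0, h0, rfl⟩
  have h : (if ((PySem.Str.split? s " ").getD [])[0] == "Z" then
      (PySem.Int.ofStr? ((PySem.List.pyGet? ((PySem.Str.split? s " ").getD [])
        ((0 : Int) + ((0 : Nat) : Int) - 1)).getD "")).isSome
    else (PySem.Int.ofStr? (((PySem.Str.split? s " ").getD [])[0])).isSome) = true :=
    hPre _ hmem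
  rw [if_pos (show ((((PySem.Str.split? s " ").getD [])[0]) == "Z") = true by simp [hz])] at h
  have hidx : (0 : Int) + ((0 : Nat) : Int) - 1 = (-1 : Int) := by norm_num
  rw [hidx] at h
  exact h

-- evaluation of both ports when the first token is "Z" (inside Pre_)
theorem eval_of_headZ (s : String) (hPre : Pre_solution s)
    (rest : List String) (hdata : (PySem.Str.split? s " ").getD [] = "Z" :: rest) :
    solution s = -(pvParse (pvLastTok s) * 2) + contribSum "Z" rest ∧
    solution_alt s = contribSum "Z" rest := by
  have hlast : (PySem.List.pyGet? ((PySem.Str.split? s " ").getD []) (-1)).getD "" = pvLastTok s := by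
    rw [PySem.List.pyGet?_neg_one, split_last s]
    rfl
  have hchain : pvChain "Z" rest := by
    have h := pvChain_of ((PySem.Str.split? s " ").getD []) (P1_of_pre s hPre)
      (((PySem.Str.split? s " ").getD []).length - 1) 1 "Z" rfl
      (fun hi hz => by
        exfalso
        have h0 : 0 + 1 < ((PySem.Str.split? s " ").getD []).length := by simpa using hi
        have := P1_of_pre s hPre 0 h0 (by simpa using hz)
        rw [show ((PySem.Str.split? s " ").getD [])[0] = "Z" by simp [hdata]] at this
        exact absurd this (by decide))
    rwa [hdata, List.drop_one, List.tail_cons] at h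
  constructor
  · unfold solution
    rw [loopA_eq_contribSum ((PySem.Str.split? s " ").getD []) _ (le_refl _),
      List.take_of_length_le (le_refl _), hlast, hdata]
    simp [contribSum]
  · show (solLoopB [] ((PySem.Str.split? s " ").getD [])).sum = contribSum "Z" rest
    rw [hdata, show solLoopB [] ("Z" :: rest) = solLoopB [] rest from rfl]
    have := loopB_eq_contribSum rest "Z" [] hchain
      (by intro h; exact absurd h (by decide))
    simpa using this

-- ===== VERDICT (by name: the statement is the Claim_ definition above) =====
theorem solution_spec : Claim_unchanged_solution := by
  intro s _ hPre
  unfold Spec_solution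
  intro hD
  unfold D_solution at hD
  by_cases hz : s.toList.takeWhile (fun c => c ≠ ' ') = ['Z']
  · -- first token is "Z", so (by ¬D_) the last token parses as 0 and both sides agree
    have h0 : PySem.Int.ofStr? (pvLastTok s) = some 0 := by
      by_contra hne
      exact hD ⟨hz, hne⟩
    obtain ⟨rest, hdata⟩ : ∃ rest, (PySem.Str.split? s " ").getD [] = "Z" :: rest := by
      have hh := split_head s
      rw [hz] at hh
      cases hcase : (PySem.Str.split? s " ").getD [] with
      | nil => rw [hcase] at hh; simp at hh
      | cons a l =>
        rw [hcase] at hh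
        simp only [List.head?_cons, Option.some.injEq] at hh
        exact ⟨l, by rw [hh]⟩
    obtain ⟨hA, hB⟩ := eval_of_headZ s hPre rest hdata
    rw [hA, hB]
    simp [pvParse, h0]
  · -- first token is not "Z": both sides equal contribSum "" data
    have hhead : ((PySem.Str.split? s " ").getD []).head? ≠ some "Z" := by
      rw [split_head s]
      intro h
      apply hz
      have := congrArg String.toList (Option.some.inj h)
      simpa using this
    unfold solution solution_alt
    set data := (PySem.Str.split? s " ").getD [] with hdata
    simp only
    have hne0 : ∀ hi : 0 < data.length, data[0] ≠ "Z" := by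
      intro hi h
      apply hhead
      rw [List.head?_eq_getElem?, List.getElem?_eq_getElem hi, h]
    have hA : solLoopA data data.length
        = contribSum ((PySem.List.pyGet? data (-1)).getD "") data := by
      rw [loopA_eq_contribSum data data.length (le_refl _), List.take_of_length_le (le_refl _)]
    have hcongr : contribSum ((PySem.List.pyGet? data (-1)).getD "") data
        = contribSum "" data := by
      cases hcase : data with
      | nil => simp [contribSum]
      | cons a l =>
        have ha : (a == "Z") = false := by
          simp only [beq_eq_false_iff_ne]
          intro h
          apply hhead
          rw [hcase, h]
          rfl
        simp [contribSum, ha]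
    have hchain : pvChain "" data := by
      have h := pvChain_of data (P1_of_pre s hPre) (data.length - 0) 0 "" rfl
        (fun hi hz' => absurd hz' (hne0 hi))
      simpa using h
    have hB : (solLoopB [] data).sum = contribSum "" data := by
      have := loopB_eq_contribSum data "" [] hchain (by intro h; exact absurd h (by decide))
      simpa using this
    rw [hA, hcongr, hB]

theorem solution_changed : Claim_changed_solution := by
  unfold Claim_changed_solution; decide

theorem solution_tight : Claim_exact_solution := by
  intro s _ hPre hD
  obtain ⟨hz, hne0⟩ := hD
  obtain ⟨rest, hdata⟩ : ∃ rest, (PySem.Str.split? s " ").getD [] = "Z" :: rest := by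
    have hh := split_head s
    rw [hz] at hh
    cases hcase : (PySem.Str.split? s " ").getD [] with
    | nil => rw [hcase] at hh; simp at hh
    | cons a l =>
      rw [hcase] at hh
      simp only [List.head?_cons, Option.some.injEq] at hh
      exact ⟨l, by rw [hh]⟩
  obtain ⟨hA, hB⟩ := eval_of_headZ s hPre rest hdata
  have hsome : (PySem.Int.ofStr? ((PySem.List.pyGet? ((PySem.Str.split? s " ").getD []) (-1)).getD "")).isSome = true :=
    P0_of_pre s hPre (by rw [hdata]; simp) (by simp [hdata])
  rw [show (PySem.List.pyGet? ((PySem.Str.split? s " ").getD []) (-1)).getD "" = pvLastTok s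
      from by rw [PySem.List.pyGet?_neg_one, split_last s]; rfl] at hsome
  obtain ⟨k, hk⟩ := Option.isSome_iff_exists.mp hsome
  have hkne : k ≠ 0 := by
    intro h
    exact hne0 (by rw [hk, h])
  have hparse : pvParse (pvLastTok s) = k := by simp [pvParse, hk]
  rw [hA, hB, hparse]
  intro h
  apply hkne
  omega
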